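-- pv_equiv track=rewrite | github.com/ildarius116/Tech_Doc_Helper | specification.py | modify_dict
-- ===== SOURCE A (Python) =====
-- def modify_dict(dct):
--     modified_dict = {}
--     for key, item_parts in dct.items():
--         for item in item_parts:
--             manufacturer = item['Manufacturer']
--             if key not in modified_dict:
--                 modified_dict[key] = {manufacturer: [item]}
--             else:
--                 if manufacturer not in modified_dict[key]:
--                     modified_dict[key].update({manufacturer: [item]})
--                 else:
--                     modified_dict[key][manufacturer].append(item)
--     return modified_dict
-- ===== SOURCE B (Python) =====
-- def modify_dict(dct):
--     return {
--         key: {m: [i for i in item_parts if i['Manufacturer'] == m]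
--               for m in dict.fromkeys(i['Manufacturer'] for i in item_parts)}
--         for key, item_parts in dct.items() if item_parts
--     }
-- ===== Notes on version B (the rewrite author's own statement) =====
-- stated objective: simpler
-- what changed: Replaced the incremental nested-dict mutation (insert/update/append per item) with a single declarative dict comprehension: distinct manufacturers in first-seen order via dict.fromkeys, then one filter pass per manufacturer.
import Mathlib
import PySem

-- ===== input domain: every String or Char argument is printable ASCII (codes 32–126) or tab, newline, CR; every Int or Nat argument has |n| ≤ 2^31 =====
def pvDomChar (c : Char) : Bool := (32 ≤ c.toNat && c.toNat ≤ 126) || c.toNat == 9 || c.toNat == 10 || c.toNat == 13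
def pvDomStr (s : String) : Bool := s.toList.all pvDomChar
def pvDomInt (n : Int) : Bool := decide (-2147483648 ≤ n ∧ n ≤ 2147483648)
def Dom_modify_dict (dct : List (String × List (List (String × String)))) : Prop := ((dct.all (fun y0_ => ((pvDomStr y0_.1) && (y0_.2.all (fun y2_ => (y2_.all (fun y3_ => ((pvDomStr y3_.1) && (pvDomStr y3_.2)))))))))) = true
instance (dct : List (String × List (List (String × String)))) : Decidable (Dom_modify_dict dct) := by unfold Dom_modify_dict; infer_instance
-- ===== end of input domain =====

-- B replaces A's incremental nested-dict mutation with a declarative group-by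
-- (distinct manufacturers in first-seen order, then a filter per manufacturer); same result, simpler code.


-- ===== PORT A =====
-- item['Manufacturer'] (used identically by both Pythons); total via a default, exact under Pre_ ("Manufacturer" present)
def pvMfg (item : List (String × String)) : String :=
  (PySem.Dict.mk item).getD "Manufacturer" ""

-- the body of A's inner loop; `update({m: [item]})` with a one-key dict is a single insert
def pvStepA (md : PySem.Dict String (PySem.Dict String (List (List (String × String)))))
    (key : String) (item : List (String × String)) :
    PySem.Dict String (PySem.Dict String (List (List (String × String)))) :=
  let manufacturer := pvMfg item
  if md.contains key = false then
    md.insert key (PySem.Dict.mk [(manufacturer, [item])])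
  else
    let inner := md.getD key (PySem.Dict.mk [])
    if inner.contains manufacturer = false then
      md.insert key (inner.insert manufacturer [item])
    else
      md.insert key (inner.modify manufacturer [] (fun l => l ++ [item]))

def modify_dict (dct : List (String × List (List (String × String)))) :
    List (String × List (String × List (List (String × String)))) :=
  ((dct.foldl (fun md kp => kp.2.foldl (fun md item => pvStepA md kp.1 item) md)
      (PySem.Dict.mk [])).items).map (fun p => (p.1, p.2.items))

-- ===== PORT B =====
def modify_dict_alt (dct : List (String × List (List (String × String)))) :
    List (String × List (String × List (List (String × String)))) :=
  dct.foldl (fun acc kp =>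
    if kp.2.isEmpty then acc
    else acc ++ [(kp.1,
      (PySem.List.dedup (kp.2.map pvMfg)).map
        (fun m => (m, kp.2.filter (fun i => pvMfg i == m))))]) []

-- ===== PRECONDITION & SPEC =====
-- Pre_ excludes (a) items lacking a 'Manufacturer' key, on which A raises KeyError, and
-- (b) association lists with duplicate keys (outer or inside an item), which do not represent
-- any Python dict input (a Python dict has unique keys).
def Pre_modify_dict (dct : List (String × List (List (String × String)))) : Prop :=
  (dct.map Prod.fst).Nodup ∧
  ∀ p ∈ dct, ∀ it ∈ p.2, (it.map Prod.fst).Nodup ∧ "Manufacturer" ∈ it.map Prod.fst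
instance (dct : List (String × List (List (String × String)))) : Decidable (Pre_modify_dict dct) := by
  unfold Pre_modify_dict; infer_instance

def pvWitness_modify_dict : (List (String × List (List (String × String)))) :=
  [("K1", [[("Manufacturer", "M"), ("Part", "p1")], [("Manufacturer", "N")]]), ("K2", [])]

def Spec_modify_dict (dct : List (String × List (List (String × String)))) (out : List (String × List (String × List (List (String × String))))) : Prop := out = modify_dict_alt dct
instance (dct : List (String × List (List (String × String)))) (out : List (String × List (String × List (List (String × String))))) : Decidable (Spec_modify_dict dct out) := by
  unfold Spec_modify_dict
  letI d1 : DecidableEq (List (String × List (List (String × String)))) := inferInstance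
  letI d2 : DecidableEq (String × List (String × List (List (String × String)))) := inferInstance
  letI d3 : DecidableEq (List (String × List (String × List (List (String × String))))) := inferInstance
  infer_instance

-- ===== CLAIM (what is proved, stated in full; the proofs are below) =====
def Claim_equal_modify_dict : Prop := ∀ (dct : List (String × List (List (String × String)))), Dom_modify_dict dct → Pre_modify_dict dct → Spec_modify_dict dct (modify_dict dct)

-- ===== LEMMAS AND PROOFS =====

-- A's inner-loop body once `key` is already bound (to `d`) in the accumulator:
-- it rewrites the inner dict with d[m] = d.get(m, []) + [item].
def pvStep1 (d : PySem.Dict String (List (List (String × String))))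
    (item : List (String × String)) : PySem.Dict String (List (List (String × String))) :=
  d.modify (pvMfg item) [] (fun l => l ++ [item])

lemma stepA_on_bound (md : PySem.Dict String (PySem.Dict String (List (List (String × String)))))
    (key : String) (d : PySem.Dict String (List (List (String × String))))
    (item : List (String × String)) :
    pvStepA (md.insert key d) key item = md.insert key (pvStep1 d item) := by
  simp only [pvStepA, pvStep1]
  rw [if_neg (by simp [PySem.Dict.contains_insert_self])]
  simp only [PySem.Dict.getD_insert_self, PySem.Dict.insert_insert_self]
  by_cases h : d.contains (pvMfg item) = false
  · rw [if_pos h]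
    unfold PySem.Dict.modify
    rw [PySem.Dict.getD_of_not_contains d _ h]
    rfl
  · rw [if_neg h]


lemma foldA_on_bound (rest : List (List (String × String)))
    (md : PySem.Dict String (PySem.Dict String (List (List (String × String)))))
    (key : String) (d : PySem.Dict String (List (List (String × String)))) :
    rest.foldl (fun m it => pvStepA m key it) (md.insert key d)
      = md.insert key (rest.foldl pvStep1 d) := by
  induction rest generalizing d with
  | nil => rfl
  | cons it rest ih => simp only [List.foldl_cons, stepA_on_bound, ih]

lemma foldA_fresh (i : List (String × String)) (is : List (List (String × String)))
    (md : PySem.Dict String (PySem.Dict String (List (List (String × String)))))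
    (key : String) (h : md.contains key = false) :
    (i :: is).foldl (fun m it => pvStepA m key it) md
      = md.insert key ((i :: is).foldl pvStep1 (PySem.Dict.mk [])) := by
  have h1 : pvStepA md key i = md.insert key (pvStep1 (PySem.Dict.mk []) i) := by
    simp only [pvStepA]
    rw [if_pos h]
    rfl
  simp only [List.foldl_cons, h1, foldA_on_bound]

-- the per-key group-by: A's inner accumulation equals B's dedup-then-filter form
lemma group_eq (items : List (List (String × String))) :
    (items.foldl pvStep1 (PySem.Dict.mk [])).items
      = (PySem.List.dedup (items.map pvMfg)).map
          (fun m => (m, items.filter (fun i => pvMfg i == m))) := by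
  have hfun : (items.foldl pvStep1 (PySem.Dict.mk []))
      = items.foldl (fun d i => d.modify (pvMfg i) [] (fun l => l ++ [i])) (PySem.Dict.mk []) := rfl
  have hkeys : (items.foldl (fun d i => d.modify (pvMfg i) [] (fun l => l ++ [i]))
      (PySem.Dict.mk (ν := List (List (String × String))) [])).keys
      = PySem.List.dedup (items.map pvMfg) := by
    rw [PySem.Dict.keys_foldl_modify_key items pvMfg [] (fun _ i => (fun l => l ++ [i]))]
    simp [PySem.Dict.keys, PySem.Set.update, PySem.Set.ofList_eq_foldl, PySem.List.dedup_eq_ofList]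
  have hnodup : (items.foldl (fun d i => d.modify (pvMfg i) [] (fun l => l ++ [i]))
      (PySem.Dict.mk (ν := List (List (String × String))) [])).keys.Nodup := by
    apply PySem.Dict.nodup_keys_foldl_modify_key
    simp [PySem.Dict.keys]
  have hgetD : ∀ c, (items.foldl (fun d i => d.modify (pvMfg i) [] (fun l => l ++ [i]))
      (PySem.Dict.mk (ν := List (List (String × String))) [])).getD c []
      = items.filter (fun i => pvMfg i == c) := by
    intro c
    have hm : items.foldl (fun d i => d.modify (pvMfg i) [] (fun l => l ++ [i]))
        (PySem.Dict.mk (ν := List (List (String × String))) [])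
        = (items.map (fun i => (pvMfg i, i))).foldl
            (fun d p => d.modify p.1 [] (fun l => l ++ [p.2])) (PySem.Dict.mk []) := by
      rw [List.foldl_map]
    rw [hm, PySem.Dict.getD_foldl_modify_append]
    simp [List.filter_map, Function.comp_def]
    rfl
  rw [hfun, PySem.Dict.items_eq_map_keys _ hnodup [], hkeys]
  exact List.map_congr_left (fun m _ => by rw [hgetD])

-- the outer loop, with A's accumulator generalized and B's output in closed form
lemma outer_eq (dct : List (String × List (List (String × String))))
    (md : PySem.Dict String (PySem.Dict String (List (List (String × String)))))
    (hfresh : ∀ p ∈ dct, md.contains p.1 = false)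
    (hnd : (dct.map Prod.fst).Nodup) :
    ((dct.foldl (fun md kp => kp.2.foldl (fun md item => pvStepA md kp.1 item) md) md).items).map
        (fun p => (p.1, p.2.items))
      = (md.items.map (fun p => (p.1, p.2.items)))
        ++ (dct.filter (fun kp => !kp.2.isEmpty)).map
            (fun kp => (kp.1, (PySem.List.dedup (kp.2.map pvMfg)).map
              (fun m => (m, kp.2.filter (fun i => pvMfg i == m))))) := by
  induction dct generalizing md with
  | nil => simp
  | cons kp rest ih =>
    have hhead : md.contains kp.1 = false := hfresh kp (by simp)
    have hnd' : (rest.map Prod.fst).Nodup := by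
      simp only [List.map_cons] at hnd; exact hnd.of_cons
    rcases hkp : kp.2 with _ | ⟨i, is⟩
    · simp only [List.foldl_cons, hkp, List.foldl_nil, List.filter_cons, List.isEmpty_nil,
        Bool.not_true, Bool.false_eq_true, if_false]
      exact ih md (fun p hp => hfresh p (by simp [hp])) hnd'
    · have hstep : kp.2.foldl (fun md item => pvStepA md kp.1 item) md
          = md.insert kp.1 (kp.2.foldl pvStep1 (PySem.Dict.mk [])) := by
        rw [hkp]; exact foldA_fresh i is md kp.1 hhead
      have hne : ∀ p ∈ rest, p.1 ≠ kp.1 := by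
        have hm : kp.1 ∉ rest.map Prod.fst := by
          simp only [List.map_cons] at hnd; exact (List.nodup_cons.mp hnd).1
        intro p hp he
        exact hm (he ▸ List.mem_map_of_mem hp)
      have hfresh' : ∀ p ∈ rest,
          (md.insert kp.1 (kp.2.foldl pvStep1 (PySem.Dict.mk []))).contains p.1 = false := by
        intro p hp
        rw [PySem.Dict.contains_insert]
        simp [hne p hp, hfresh p (by simp [hp])]
      have hemp : kp.2.isEmpty = false := by rw [hkp]; rfl
      simp only [List.foldl_cons, hstep]
      rw [ih _ hfresh' hnd',
        PySem.Dict.items_insert_of_not_contains md _ hhead]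
      simp only [List.filter_cons, hemp, Bool.not_false, if_pos, List.map_append, List.map_cons,
        List.map_nil, List.append_assoc]
      rw [group_eq]
      simp

-- ===== VERDICT (by name: the statement is the Claim_ definition above) =====
theorem modify_dict_spec : Claim_equal_modify_dict := by
  intro dct _ hpre
  unfold Spec_modify_dict modify_dict modify_dict_alt
  rw [PySem.List.foldl_congr_mem dct _
    (fun acc kp =>
      if (!kp.2.isEmpty) = true
      then acc ++ [(kp.1, (PySem.List.dedup (kp.2.map pvMfg)).map
        (fun m => (m, kp.2.filter (fun i => pvMfg i == m))))] else acc) []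
    (by intro acc kp _; cases h : kp.2.isEmpty <;> simp [h]),
    PySem.List.foldl_append_if]
  rw [outer_eq dct _ (fun p _ => rfl) hpre.1]
  simp
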